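-- pv_equiv track=rewrite | github.com/ipaynter-umb/laads_tools | src/s_landsat_comparisons.py | unpack_qf
-- ===== SOURCE A (Python) =====
-- def unpack_qf(qf):
--
--     unpacked = bin(qf)[2:]
--
--     while len(unpacked) < 16:
--         unpacked = '0' + unpacked
--
--     reversed = ''
--
--     unpacked_list = list(unpacked)
--     while unpacked_list:
--         reversed += unpacked_list.pop()
--
--     fill = False
--     if reversed[0] == '1':
--         fill = True
--
--     cloud = False
--     if reversed[6] == '0':
--         cloud = True
--
--     shadow = False
--     if reversed[4] == '1':
--         shadow = True
--
--     water = False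
--     if reversed[7] == '1':
--         water = True
--
--     return fill, cloud, shadow, water
-- ===== SOURCE B (Python) =====
-- def unpack_qf(qf):
--     fill = (qf >> 0) & 1 == 1
--     cloud = (qf >> 6) & 1 == 0
--     shadow = (qf >> 4) & 1 == 1
--     water = (qf >> 7) & 1 == 1
--     return fill, cloud, shadow, water
-- ===== Notes on version B (the rewrite author's own statement) =====
-- stated objective: simpler
-- what changed: Replaces the binary-string build/pad/reverse pipeline with four direct bitwise reads ((qf >> k) & 1) on the integer.
-- outside the precondition, e.g. on unpack_qf(-5): A returns (True, True, False, False), B returns (True, False, True, True)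
import Mathlib
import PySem

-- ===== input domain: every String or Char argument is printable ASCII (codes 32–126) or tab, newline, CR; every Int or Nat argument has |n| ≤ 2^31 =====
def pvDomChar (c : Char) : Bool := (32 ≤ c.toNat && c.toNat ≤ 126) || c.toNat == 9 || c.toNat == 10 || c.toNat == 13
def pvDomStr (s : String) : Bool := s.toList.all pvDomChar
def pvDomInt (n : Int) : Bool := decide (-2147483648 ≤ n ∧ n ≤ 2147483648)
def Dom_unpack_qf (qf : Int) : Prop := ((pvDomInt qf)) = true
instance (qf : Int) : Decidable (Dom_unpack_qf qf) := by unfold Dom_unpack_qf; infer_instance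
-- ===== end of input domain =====

-- B replaces A's binary-string build/pad/reverse pipeline with four direct bitwise reads on the
-- integer (simpler); equivalence is claimed on the natural non-negative domain of the quality flag.

-- ===== PORT A =====
-- binary digits of a natural number, least-significant first (helper for the hand port of bin())
def pvBinRev : Nat → List Char
  | 0 => []
  | n+1 => (if (n+1) % 2 = 1 then '1' else '0') :: pvBinRev ((n+1)/2)
decreasing_by omega

-- bin(qf)[2:] exactly: for qf ≥ 0 the binary digits, for qf < 0 the 'b' of '-0b…' survives the slice
def pvBin (qf : Int) : List Char :=
  if qf < 0 then 'b' :: (pvBinRev (-qf).toNat).reverse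
  else if qf = 0 then ['0']
  else (pvBinRev qf.toNat).reverse

-- while len(unpacked) < 16: unpacked = '0' + unpacked
def pvPad (s : List Char) : List Char :=
  if s.length < 16 then pvPad ('0' :: s) else s
termination_by 16 - s.length
decreasing_by simp; omega

-- while unpacked_list: reversed += unpacked_list.pop()
def pvRevLoop (lst rev : List Char) : List Char :=
  match h : PySem.List.pop? lst with
  | none => rev
  | some (x, rest) => pvRevLoop rest (rev ++ [x])
termination_by lst.length
decreasing_by
  have := PySem.List.length_of_pop?_eq_some lst h
  simp at this; omega

def unpack_qf (qf : Int) : Bool × Bool × Bool × Bool :=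
  let unpacked := pvPad (pvBin qf)
  let rev := pvRevLoop unpacked []
  let fill := if PySem.List.pyGet? rev 0 = some '1' then true else false
  let cloud := if PySem.List.pyGet? rev 6 = some '0' then true else false
  let shadow := if PySem.List.pyGet? rev 4 = some '1' then true else false
  let water := if PySem.List.pyGet? rev 7 = some '1' then true else false
  (fill, cloud, shadow, water)

-- ===== PORT B =====
-- (qf >> k) & 1 on qf.toNat; exact for the non-negative qf admitted by Pre_unpack_qf
def unpack_qf_alt (qf : Int) : Bool × Bool × Bool × Bool :=
  let n := qf.toNat
  (decide ((n >>> 0) &&& 1 = 1),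
   decide ((n >>> 6) &&& 1 = 0),
   decide ((n >>> 4) &&& 1 = 1),
   decide ((n >>> 7) &&& 1 = 1))

-- ===== PRECONDITION & SPEC =====
-- Pre_ excludes negative qf: a quality flag is an unsigned sixteen-bit word, and on negative input A's
-- slice of '-0b…' leaves a stray 'b' in the string, an accidental value of the implementation.
def Pre_unpack_qf (qf : Int) : Prop := 0 ≤ qf
instance (qf : Int) : Decidable (Pre_unpack_qf qf) := by unfold Pre_unpack_qf; infer_instance

def pvWitness_unpack_qf : Int := 21824

def Spec_unpack_qf (qf : Int) (out : Bool × Bool × Bool × Bool) : Prop := out = unpack_qf_alt qf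
instance (qf : Int) (out : Bool × Bool × Bool × Bool) : Decidable (Spec_unpack_qf qf out) := by unfold Spec_unpack_qf; infer_instance

-- ===== CLAIM (what is proved, stated in full; the proofs are below) =====
def Claim_equal_unpack_qf : Prop := ∀ (qf : Int), Dom_unpack_qf qf → Pre_unpack_qf qf → Spec_unpack_qf qf (unpack_qf qf)

-- ===== LEMMAS AND PROOFS =====

theorem pvRevLoop_eq (lst : List Char) : ∀ rev, pvRevLoop lst rev = rev ++ lst.reverse := by
  induction lst using List.reverseRecOn with
  | nil =>
      intro rev
      rw [pvRevLoop.eq_def]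
      split
      · simp
      · next x rest h => simp [PySem.List.pop?, PySem.List.pyIdx?] at h
  | append_singleton xs x ih =>
      intro rev
      rw [pvRevLoop.eq_def]
      split
      · next h => rw [PySem.List.pop?_last] at h; cases h
      · next y rest h =>
          rw [PySem.List.pop?_last] at h
          obtain ⟨rfl, rfl⟩ : x = y ∧ xs = rest := by simpa using h
          rw [ih]
          simp

theorem pvPad_eq (s : List Char) : pvPad s = List.replicate (16 - s.length) '0' ++ s := by
  by_cases h : s.length < 16
  · rw [pvPad]
    simp only [h, if_true]
    rw [pvPad_eq ('0' :: s)]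
    have : 16 - s.length = (16 - ('0' :: s).length) + 1 := by simp; omega
    rw [this, List.replicate_succ']
    simp
  · rw [pvPad]
    simp only [h, if_false]
    have : 16 - s.length = 0 := by omega
    simp [this]
termination_by 16 - s.length
decreasing_by simp; omega

theorem pvBinRev_getElem? (n : Nat) : ∀ (k m : Nat),
    (pvBinRev n ++ List.replicate m '0')[k]? =
      if k < (pvBinRev n).length + m then some (if n.testBit k then '1' else '0') else none := by
  induction n using Nat.strong_induction_on with
  | _ n ih =>
    intro k m
    match n with
    | 0 =>
        simp [pvBinRev, List.getElem?_replicate, Nat.zero_testBit]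
    | j+1 =>
        rw [pvBinRev]
        match k with
        | 0 => simp [Nat.testBit_zero]
        | k+1 =>
            have hlt : (j+1)/2 < j+1 := by omega
            simp only [List.cons_append, List.getElem?_cons_succ, List.length_cons]
            rw [ih _ hlt k m]
            rw [Nat.testBit_add_one]
            have : k + 1 < (pvBinRev ((j+1)/2)).length + 1 + m ↔
                   k < (pvBinRev ((j+1)/2)).length + m := by omega
            simp only [this]

theorem bit_one (n k : Nat) : decide ((n >>> k) &&& 1 = 1) = n.testBit k := by
  simp [Nat.testBit, Nat.and_one_is_mod, Nat.one_and_eq_mod_two]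

theorem bit_zero (n k : Nat) : decide ((n >>> k) &&& 1 = 0) = !n.testBit k := by
  rw [← bit_one n k]
  rcases Nat.mod_two_eq_zero_or_one (n >>> k) with h | h <;>
    simp [Nat.and_one_is_mod, h]

theorem rev_get (n : Nat) (k : Nat) (hk : k < 16) :
    (pvBinRev n ++ List.replicate (16 - (pvBinRev n).length) '0')[k]? =
      some (if n.testBit k then '1' else '0') := by
  rw [pvBinRev_getElem?]
  have : k < (pvBinRev n).length + (16 - (pvBinRev n).length) := by omega
  simp [this]

theorem pyGet_rev (n : Nat) (k : Nat) (hk : k < 16) :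
    PySem.List.pyGet? (pvBinRev n ++ List.replicate (16 - (pvBinRev n).length) '0') (k : Int) =
      some (if n.testBit k then '1' else '0') := by
  rw [PySem.List.pyGet?_natCast]
  exact rev_get n k hk

-- ===== VERDICT (by name: the statement is the Claim_ definition above) =====
theorem unpack_qf_spec : Claim_equal_unpack_qf := by
  intro qf _ hpre
  unfold Spec_unpack_qf
  have hq : 0 ≤ qf := hpre
  have hneg : ¬ qf < 0 := by omega
  have hrev : pvRevLoop (pvPad (pvBin qf)) [] =
      pvBinRev qf.toNat ++ List.replicate (16 - (pvBinRev qf.toNat).length) '0' := by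
    by_cases h0 : qf = 0
    · subst h0
      rw [pvBin]
      norm_num
      rw [pvPad_eq, pvRevLoop_eq]
      simp [pvBinRev]
    · rw [pvBin]
      simp only [hneg, if_false, h0, if_false]
      rw [pvPad_eq, pvRevLoop_eq]
      simp [List.reverse_append]
  simp only [unpack_qf, unpack_qf_alt, hrev]
  have g0 := pyGet_rev qf.toNat 0 (by omega)
  have g4 := pyGet_rev qf.toNat 4 (by omega)
  have g6 := pyGet_rev qf.toNat 6 (by omega)
  have g7 := pyGet_rev qf.toNat 7 (by omega)
  simp only [Nat.cast_ofNat, Nat.cast_zero] at g0 g4 g6 g7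
  rw [g0, g4, g6, g7, bit_one, bit_one, bit_one, bit_zero]
  cases hb0 : qf.toNat.testBit 0 <;> cases hb4 : qf.toNat.testBit 4 <;>
    cases hb6 : qf.toNat.testBit 6 <;> cases hb7 : qf.toNat.testBit 7 <;> simp
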